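-- pv_equiv track=rewrite | github.com/ZAX3000/mailtrace | server/app/dao/staging_crm.py | _resolve_canonical_to_source
-- ===== SOURCE A (Python) =====
-- from typing import Iterable, List, Dict, Any, Tuple, Optional
--
-- REQUIRED: set[str] = {"address1", "city", "state", "zip", "job_date"}
--
-- ALIASES: Dict[str, List[str]] = {
--     "crm_id": ["crm_id", "lead_id", "job_id", "id"],  # if CSV has "id", we treat as crm_id by default
--     "source_id": ["source_id", "source id", "external_id", "ext_id"],  # keep distinct from "id" to avoid collision
--     "address1": ["address1", "addr1", "address 1", "address", "street", "line1", "line 1"],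
--     "address2": ["address2", "addr2", "address 2", "unit", "line2", "apt", "apartment", "suite", "line 2"],
--     "city": ["city", "town"],
--     "state": ["state", "st"],
--     "zip": ["postal_code", "zip", "zipcode", "zip_code", "zip code"],
--     "job_date": ["job_date", "date", "created_at", "job date"],
--     "job_value": ["job_value", "amount", "value", "revenue", "job value"],
-- }
--
-- def _canon_header_map(in_headers: Iterable[str]) -> Tuple[Dict[str, str], set[str]]:
--     """
--     Build a mapping from original CSV headers to canonical names using ALIASES.
--     Returns (mapping_original_to_canonical, missing_required_after_aliasing).
--     """
--     headers_list = list(in_headers)  # make indexable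
--     lower = [h.strip().lower() for h in headers_list]
--     used: set[str] = set()
--     mapping: Dict[str, str] = {}
--     for canon, alts in ALIASES.items():
--         for a in alts:
--             if a in lower:
--                 src = headers_list[lower.index(a)]
--                 mapping[src] = canon
--                 used.add(canon)
--                 break
--     missing = REQUIRED - used
--     return mapping, missing
--
-- def _resolve_canonical_to_source(headers: List[str], mapping_arg: Optional[Dict[str, Any]]) -> Dict[str, str]:
--     """
--     Build canonical_name -> original_header mapping.
--     Priority:
--       1) mapping_arg (canonical->header)
--       2) alias inference from ALIASES
--     """
--     headers_lower = [h.strip().lower() for h in headers]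
--
--     if mapping_arg:
--         out: Dict[str, str] = {}
--         for canon, src in mapping_arg.items():
--             if not isinstance(src, str) or not src:
--                 continue
--             # accept if present in file headers
--             if src in headers:
--                 out[canon] = src
--                 continue
--             # try case-insensitive match
--             if src.lower() in headers_lower:
--                 out[canon] = headers[headers_lower.index(src.lower())]
--         # we don't enforce REQUIRED here; we'll validate later
--         if out:
--             return out
--
--     # fallback: alias inference (canonical <- original)
--     original_to_canon, _ = _canon_header_map(headers)
--     # invert to canon -> orig
--     canon_to_orig: Dict[str, str] = {}
--     for orig, canon in original_to_canon.items():
--         # keep first seen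
--         canon_to_orig.setdefault(canon, orig)
--     return canon_to_orig
-- ===== SOURCE B (Python) =====
-- from typing import List, Dict, Any, Optional, Tuple
--
-- ALIASES: Dict[str, List[str]] = {
--     "crm_id": ["crm_id", "lead_id", "job_id", "id"],
--     "source_id": ["source_id", "source id", "external_id", "ext_id"],
--     "address1": ["address1", "addr1", "address 1", "address", "street", "line1", "line 1"],
--     "address2": ["address2", "addr2", "address 2", "unit", "line2", "apt", "apartment", "suite", "line 2"],
--     "city": ["city", "town"],
--     "state": ["state", "st"],
--     "zip": ["postal_code", "zip", "zipcode", "zip_code", "zip code"],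
--     "job_date": ["job_date", "date", "created_at", "job date"],
--     "job_value": ["job_value", "amount", "value", "revenue", "job value"],
-- }
--
--
-- def _alias_info(s: str) -> Optional[Tuple[str, int]]:
--     """Classify a normalized header: which canonical field it aliases, and the alias's priority rank."""
--     for canon, alts in ALIASES.items():
--         if s in alts:
--             return canon, alts.index(s)
--     return None
--
--
-- def _resolve_canonical_to_source(headers: List[str], mapping_arg: Optional[Dict[str, Any]]) -> Dict[str, str]:
--     if mapping_arg:
--         exact = set(headers)
--         lowmap: Dict[str, str] = {}
--         for h in headers:
--             lowmap.setdefault(h.strip().lower(), h)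
--         out: Dict[str, str] = {}
--         for canon, src in mapping_arg.items():
--             if isinstance(src, str) and src:
--                 if src in exact:
--                     out[canon] = src
--                 else:
--                     hit = lowmap.get(src.lower())
--                     if hit is not None:
--                         out[canon] = hit
--         if out:
--             return out
--
--     # fallback: one pass over the headers, classifying each; per canonical field keep
--     # the candidate with the best (lowest) alias rank, earliest header winning ties
--     best: Dict[str, Tuple[int, str]] = {}
--     for h in headers:
--         info = _alias_info(h.strip().lower())
--         if info is not None:
--             canon, rank = info
--             cur = best.get(canon)
--             if cur is None or rank < cur[0]:
--                 best[canon] = (rank, h)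
--     return {canon: best[canon][1] for canon in ALIASES if canon in best}
-- ===== Notes on version B (the rewrite author's own statement) =====
-- stated objective: faster
-- what changed: The alias fallback inverts the loop nesting: instead of scanning ALIASES and searching the header list per alias (then inverting an orig->canon dict), B makes one pass over the headers, classifies each normalized header via _alias_info into (canonical, alias rank), and keeps per canonical field the best-ranked earliest header; the mapping_arg branch replaces A's per-item 'src in headers' and headers_lower.index list scans (O(H) each) with a set of headers and a first-wins lowered-header dict built once.
import Mathlib
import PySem

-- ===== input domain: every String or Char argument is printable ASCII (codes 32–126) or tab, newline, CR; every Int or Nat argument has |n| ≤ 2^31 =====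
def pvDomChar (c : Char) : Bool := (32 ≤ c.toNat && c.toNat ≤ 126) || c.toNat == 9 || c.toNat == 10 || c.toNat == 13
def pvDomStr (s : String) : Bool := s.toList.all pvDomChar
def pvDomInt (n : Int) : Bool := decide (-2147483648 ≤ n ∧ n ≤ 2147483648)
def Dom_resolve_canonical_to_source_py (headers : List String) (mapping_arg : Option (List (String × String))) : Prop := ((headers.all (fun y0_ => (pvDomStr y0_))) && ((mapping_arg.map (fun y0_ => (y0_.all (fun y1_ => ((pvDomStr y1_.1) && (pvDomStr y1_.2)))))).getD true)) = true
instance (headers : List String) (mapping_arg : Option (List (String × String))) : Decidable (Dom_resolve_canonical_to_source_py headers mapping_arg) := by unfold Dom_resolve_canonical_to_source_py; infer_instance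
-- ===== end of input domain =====

-- B inverts the alias fallback's loop nesting (one classifying pass over the headers, keeping the
-- best-ranked candidate per canonical field) and replaces the override branch's list scans with
-- hash indexes built once (objective: faster, measured).

-- module constants shared by both Pythons
def pvAliases : List (String × List String) := [
  ("crm_id", ["crm_id", "lead_id", "job_id", "id"]),
  ("source_id", ["source_id", "source id", "external_id", "ext_id"]),
  ("address1", ["address1", "addr1", "address 1", "address", "street", "line1", "line 1"]),
  ("address2", ["address2", "addr2", "address 2", "unit", "line2", "apt", "apartment", "suite", "line 2"]),
  ("city", ["city", "town"]),
  ("state", ["state", "st"]),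
  ("zip", ["postal_code", "zip", "zipcode", "zip_code", "zip code"]),
  ("job_date", ["job_date", "date", "created_at", "job date"]),
  ("job_value", ["job_value", "amount", "value", "revenue", "job value"])]

def pvRequired : PySem.Set String := PySem.Set.ofList ["address1", "city", "state", "zip", "job_date"]

-- h.strip().lower()
def pvStripLower (h : String) : String := PySem.Str.lower (PySem.Str.strip h)

-- ===== PORT A =====
-- inner 'for a in alts: if a in lower: src = headers_list[lower.index(a)]; mapping[src] = canon; used.add(canon); break'
-- state st = (used, mapping); the 'none' branches are unreachable (a ∈ lower guards index?, index is in range)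
def pvCanonAltLoop (headers_list lower : List String) (canon : String) (alts : List String)
    (st : PySem.Set String × PySem.Dict String String) : PySem.Set String × PySem.Dict String String :=
  match alts with
  | [] => st
  | a :: rest =>
    if lower.contains a then
      match PySem.List.index? lower a with
      | some i =>
        match headers_list[i]? with
        | some src => (PySem.Set.add st.1 canon, st.2.insert src canon)
        | none => st
      | none => st
    else pvCanonAltLoop headers_list lower canon rest st

-- _canon_header_map: (original→canonical mapping, missing required)
def canon_header_map (in_headers : List String) : PySem.Dict String String × PySem.Set String :=
  let headers_list := in_headers
  let lower := headers_list.map pvStripLower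
  let st := pvAliases.foldl (fun st p => pvCanonAltLoop headers_list lower p.1 p.2 st)
              (PySem.Set.empty, PySem.Dict.empty)
  (st.2, PySem.Set.diff pvRequired st.1)

-- loop body of the mapping_arg branch of A ('src' is always a str under the type convention, so
-- 'not isinstance(src, str) or not src' is just 'src == ""')
def pvOutStepA (headers headers_lower : List String) (out : PySem.Dict String String)
    (p : String × String) : PySem.Dict String String :=
  if p.2 = "" then out
  else if headers.contains p.2 then out.insert p.1 p.2
  else if headers_lower.contains (PySem.Str.lower p.2) then
    match PySem.List.index? headers_lower (PySem.Str.lower p.2) with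
    | some i =>
      match headers[i]? with
      | some h => out.insert p.1 h
      | none => out
    | none => out
  else out

def resolve_canonical_to_source_py (headers : List String) (mapping_arg : Option (List (String × String))) : List (String × String) :=
  let headers_lower := headers.map pvStripLower
  let fallback :=
    let original_to_canon := (canon_header_map headers).1
    -- invert to canon -> orig, keep first seen (setdefault)
    (original_to_canon.items.foldl (fun d p => d.setdefault p.2 p.1) PySem.Dict.empty).items
  match mapping_arg with
  | none => fallback
  | some lst =>
    let m := PySem.Dict.ofList lst
    if m.items.isEmpty then fallback
    else
      let out := m.items.foldl (pvOutStepA headers headers_lower) PySem.Dict.empty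
      if out.items.isEmpty then fallback else out.items

-- ===== PORT B =====
-- _alias_info: scan ALIASES, classify a normalized header into (canonical field, alias rank)
def pvAliasInfoAux (L : List (String × List String)) (s : String) : Option (String × Nat) :=
  match L with
  | [] => none
  | (c, alts) :: rest =>
    if alts.contains s then
      match PySem.List.index? alts s with
      | some r => some (c, r)
      | none => none
    else pvAliasInfoAux rest s

def pvAliasInfo (s : String) : Option (String × Nat) := pvAliasInfoAux pvAliases s

-- loop body of B's fallback: keep per canonical field the best (lowest-rank, earliest) header
def pvBestStep (best : PySem.Dict String (Nat × String)) (h : String) : PySem.Dict String (Nat × String) :=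
  match pvAliasInfo (pvStripLower h) with
  | some (c, rk) =>
    match best.get? c with
    | none => best.insert c (rk, h)
    | some cur => if rk < cur.1 then best.insert c (rk, h) else best
  | none => best

-- B's fallback: one pass over the headers, then emit canons in ALIASES order
def pvFallbackB (headers : List String) : List (String × String) :=
  let best := headers.foldl pvBestStep PySem.Dict.empty
  (pvAliases.foldl (fun out p =>
      match best.get? p.1 with
      | some pr => out.insert p.1 pr.2
      | none => out) PySem.Dict.empty).items

-- loop body of B's mapping_arg branch ('exact' set and first-wins lowered-header index built once)
def pvOutStepB (exact : PySem.Set String) (lowmap : PySem.Dict String String)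
    (out : PySem.Dict String String) (p : String × String) : PySem.Dict String String :=
  if p.2 ≠ "" then
    if exact.contains p.2 then out.insert p.1 p.2
    else
      match lowmap.get? (PySem.Str.lower p.2) with
      | some hit => out.insert p.1 hit
      | none => out
  else out

def resolve_canonical_to_source_py_alt (headers : List String) (mapping_arg : Option (List (String × String))) : List (String × String) :=
  match mapping_arg with
  | none => pvFallbackB headers
  | some lst =>
    let m := PySem.Dict.ofList lst
    if m.items.isEmpty then pvFallbackB headers
    else
      let exact := PySem.Set.ofList headers
      let lowmap := headers.foldl (fun d h => d.setdefault (pvStripLower h) h) PySem.Dict.empty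
      let out := m.items.foldl (pvOutStepB exact lowmap) PySem.Dict.empty
      if out.items.isEmpty then pvFallbackB headers else out.items

-- ===== PRECONDITION & SPEC =====
def Spec_resolve_canonical_to_source_py (headers : List String) (mapping_arg : Option (List (String × String))) (out : List (String × String)) : Prop := out = resolve_canonical_to_source_py_alt headers mapping_arg
instance (headers : List String) (mapping_arg : Option (List (String × String))) (out : List (String × String)) : Decidable (Spec_resolve_canonical_to_source_py headers mapping_arg out) := by unfold Spec_resolve_canonical_to_source_py; infer_instance

-- ===== CLAIM (what is proved, stated in full; the proofs are below) =====
def Claim_equal_resolve_canonical_to_source_py : Prop := ∀ (headers : List String) (mapping_arg : Option (List (String × String))), Dom_resolve_canonical_to_source_py headers mapping_arg → Spec_resolve_canonical_to_source_py headers mapping_arg (resolve_canonical_to_source_py headers mapping_arg)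

-- ===== LEMMAS AND PROOFS =====

-- first alias of 'alts' present in the lowered header list, and its first index there
def pvFirstAltIdx (headers_lower : List String) (alts : List String) : Option Nat :=
  match alts with
  | [] => none
  | a :: rest =>
    if headers_lower.contains a then PySem.List.index? headers_lower a
    else pvFirstAltIdx headers_lower rest

-- the canonical→header pairs contributed by the alias entries 'rem'
def pvDelta (headers lower : List String) (rem : List (String × List String)) : List (String × String) :=
  rem.flatMap (fun p =>
    match (pvFirstAltIdx lower p.2).bind (fun i => headers[i]?) with
    | some h => [(p.1, h)]
    | none => [])

-- merge of two fallback candidates: the left (earlier) one wins unless the right has a strictly lower rank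
def pvMerge (p q : Option (Nat × String)) : Option (Nat × String) :=
  match p, q with
  | none, o => o
  | some p, none => some p
  | some p, some q => if q.1 < p.1 then some q else some p

-- per-canon spec of B's header pass
def pvBest (alts : List String) : List String → Option (Nat × String)
  | [] => none
  | h :: t => pvMerge ((PySem.List.index? alts (pvStripLower h)).map (fun r => (r, h))) (pvBest alts t)

-- first alias present, as the header it picks
def pvFirstF (alts hs : List String) : Option String :=
  match alts with
  | [] => none
  | a :: rest =>
    if (hs.map pvStripLower).contains a then hs.find? (fun h => pvStripLower h == a)
    else pvFirstF rest hs

lemma canonAltLoop_eq (headers lower : List String) (canon : String) (alts : List String)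
    (st : PySem.Set String × PySem.Dict String String) :
    pvCanonAltLoop headers lower canon alts st =
      match pvFirstAltIdx lower alts with
      | some i =>
        match headers[i]? with
        | some src => (PySem.Set.add st.1 canon, st.2.insert src canon)
        | none => st
      | none => st := by
  induction alts with
  | nil => rfl
  | cons a rest ih =>
    simp only [pvCanonAltLoop, pvFirstAltIdx]
    by_cases h : lower.contains a = true
    · rw [if_pos h, if_pos h]
    · rw [if_neg h, if_neg h, ih]

lemma firstAltIdx_spec (lower alts : List String) (i : Nat)
    (h : pvFirstAltIdx lower alts = some i) :
    ∃ a ∈ alts, PySem.List.index? lower a = some i := by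
  induction alts with
  | nil => simp [pvFirstAltIdx] at h
  | cons a rest ih =>
    simp only [pvFirstAltIdx] at h
    by_cases hc : lower.contains a = true
    · rw [if_pos hc] at h
      exact ⟨a, List.mem_cons_self, h⟩
    · rw [if_neg hc] at h
      obtain ⟨b, hb, hi⟩ := ih h
      exact ⟨b, List.mem_cons_of_mem _ hb, hi⟩

-- A's alias fold appends (src, canon) pairs
lemma foldA_items (headers : List String) (rem : List (String × List String))
    (st : PySem.Set String × PySem.Dict String String)
    (hkeys : ∀ s ∈ st.2.keys, ∀ q ∈ rem, pvStripLower s ∉ q.2)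
    (hnd : (rem.flatMap Prod.snd).Nodup) :
    (rem.foldl (fun st p => pvCanonAltLoop headers (headers.map pvStripLower) p.1 p.2 st) st).2.items
      = st.2.items ++ (pvDelta headers (headers.map pvStripLower) rem).map Prod.swap := by
  induction rem generalizing st with
  | nil => simp [pvDelta]
  | cons p rest ih =>
    simp only [List.foldl_cons]
    rw [canonAltLoop_eq]
    have hnd' : p.2.Nodup ∧ (rest.flatMap Prod.snd).Nodup ∧ ∀ x ∈ p.2, ∀ y ∈ rest.flatMap Prod.snd, x ≠ y :=
      (List.nodup_append).1 (by simpa [List.flatMap_cons] using hnd)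
    cases hfa : pvFirstAltIdx (headers.map pvStripLower) p.2 with
    | none =>
      rw [ih st (fun s hs q hq => hkeys s hs q (List.mem_cons_of_mem _ hq)) hnd'.2.1]
      simp [pvDelta, hfa]
    | some i =>
      obtain ⟨a, ha, hidx⟩ := firstAltIdx_spec _ _ _ hfa
      obtain ⟨hk, hget, -⟩ := PySem.List.getElem_of_index?_eq_some hidx
      have hilen : i < headers.length := by simpa using hk
      have hgl : headers[i]? = some headers[i] := List.getElem?_eq_getElem hilen
      have hsl : pvStripLower headers[i] = a := by simpa using hget
      have hfp : st.2.contains headers[i] = false := by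
        rcases Bool.eq_false_or_eq_true (st.2.contains headers[i]) with h | h
        swap
        · exact h
        · exact absurd (hsl ▸ ha)
            (hkeys _ ((PySem.Dict.contains_iff_mem_keys _ _).1 h) p List.mem_cons_self)
      simp only [hgl]
      have hins : ∀ s ∈ (st.2.insert headers[i] p.1).keys, ∀ q ∈ rest, pvStripLower s ∉ q.2 := by
        intro s hs q hq
        rcases (PySem.Dict.mem_keys_insert _ _ _ _).1 hs with he | hmem
        · subst he
          rw [hsl]
          exact fun hmem2 => hnd'.2.2 a ha a (List.mem_flatMap.2 ⟨q, hq, hmem2⟩) rfl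
        · exact hkeys s hmem q (List.mem_cons_of_mem _ hq)
      rw [ih (st.1.add p.1, st.2.insert headers[i] p.1) hins hnd'.2.1,
          PySem.Dict.items_insert_of_not_contains _ _ hfp]
      simp [pvDelta, hfa, hgl]

lemma delta_fst_sublist (headers lower : List String) (rem : List (String × List String)) :
    ((pvDelta headers lower rem).map Prod.fst).Sublist (rem.map Prod.fst) := by
  induction rem with
  | nil => simp [pvDelta]
  | cons p rest ih =>
    simp only [pvDelta, List.flatMap_cons, List.map_append, List.map_cons]
    cases hfa : (pvFirstAltIdx lower p.2).bind (fun i => headers[i]?) with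
    | none =>
      simp only [hfa, List.map_nil, List.nil_append]
      exact List.Sublist.cons _ (by simpa [pvDelta] using ih)
    | some h =>
      simp only [hfa, List.map_cons, List.map_nil, List.singleton_append]
      exact List.Sublist.cons₂ _ (by simpa [pvDelta] using ih)

lemma setdefault_fold (l : List (String × String)) (d : PySem.Dict String String)
    (hfresh : ∀ p ∈ l, d.contains p.1 = false)
    (hnd : (l.map Prod.fst).Nodup) :
    (l.foldl (fun d p => d.setdefault p.1 p.2) d).items = d.items ++ l := by
  induction l generalizing d with
  | nil => simp
  | cons p rest ih =>
    simp only [List.foldl_cons, List.map_cons, List.nodup_cons] at *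
    have hfp := hfresh p (List.mem_cons_self)
    rw [PySem.Dict.setdefault_of_not_contains _ _ hfp]
    have hins : ∀ q ∈ rest, (d.insert p.1 p.2).contains q.1 = false := by
      intro q hq
      rw [PySem.Dict.contains_insert]
      have : q.1 ≠ p.1 := fun he => hnd.1 (he ▸ List.mem_map_of_mem hq)
      simp [this, hfresh q (List.mem_cons_of_mem _ hq)]
    rw [ih (d.insert p.1 p.2) hins hnd.2,
        PySem.Dict.items_insert_of_not_contains _ _ hfp]
    simp

-- A's fallback produces exactly the delta list
lemma fallbackA_eq_delta (headers : List String) :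
    resolve_canonical_to_source_py headers none
      = pvDelta headers (headers.map pvStripLower) pvAliases := by
  simp only [resolve_canonical_to_source_py, canon_header_map]
  rw [foldA_items headers pvAliases (PySem.Set.empty, PySem.Dict.empty)
        (by simp [PySem.Dict.keys_empty]) (by decide)]
  have hempty : (PySem.Dict.empty : PySem.Dict String String).items = [] := rfl
  rw [hempty]
  simp only [List.nil_append, List.foldl_map, Prod.fst_swap, Prod.snd_swap]
  rw [setdefault_fold _ PySem.Dict.empty (fun p _ => PySem.Dict.contains_empty _)
        ((delta_fst_sublist headers (headers.map pvStripLower) pvAliases).nodup (by decide))]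
  rw [hempty, List.nil_append]

-- ---------- B-side: the alias scan per header ----------

lemma aliasAux_mem (L : List (String × List String)) (s c : String) (r : Nat)
    (h : pvAliasInfoAux L s = some (c, r)) : c ∈ L.map Prod.fst := by
  induction L with
  | nil => simp [pvAliasInfoAux] at h
  | cons p rest ih =>
    obtain ⟨c', alts'⟩ := p
    simp only [pvAliasInfoAux] at h
    by_cases hc : alts'.contains s = true
    · rw [if_pos hc] at h
      cases hi : PySem.List.index? alts' s with
      | none => rw [hi] at h; exact absurd h (by simp)
      | some r' =>
        rw [hi] at h
        simp only [Option.some.injEq, Prod.mk.injEq] at h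
        simp [h.1]
    · rw [if_neg hc] at h
      exact List.mem_cons_of_mem _ (ih h)

lemma aliasAux_of_index (L : List (String × List String)) (s c : String) (alts : List String) (r : Nat)
    (hnd : (L.flatMap Prod.snd).Nodup) (hc : (c, alts) ∈ L)
    (h : PySem.List.index? alts s = some r) : pvAliasInfoAux L s = some (c, r) := by
  induction L with
  | nil => simp at hc
  | cons p rest ih =>
    obtain ⟨c', alts'⟩ := p
    have hmem : s ∈ alts := (PySem.List.index?_isSome_iff alts s).1 (by rw [h]; rfl)
    have hnd' := (List.nodup_append).1 (by simpa [List.flatMap_cons] using hnd)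
    simp only [pvAliasInfoAux]
    rcases List.mem_cons.1 hc with he | ht
    · obtain ⟨he1, he2⟩ := Prod.mk.injEq .. ▸ he
      subst he1; subst he2
      rw [if_pos (by simpa using hmem), h]
    · have hnc : alts'.contains s = false := by
        by_cases hb : s ∈ alts'
        · exact absurd rfl (hnd'.2.2 s hb s (List.mem_flatMap.2 ⟨(c, alts), ht, hmem⟩))
        · simpa using hb
      rw [if_neg (by rw [hnc]; simp)]
      exact ih hnd'.2.1 ht

lemma aliasAux_to_index (L : List (String × List String)) (s c : String) (alts : List String) (r : Nat)
    (hndf : (L.map Prod.fst).Nodup) (hc : (c, alts) ∈ L)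
    (h : pvAliasInfoAux L s = some (c, r)) : PySem.List.index? alts s = some r := by
  induction L with
  | nil => simp at hc
  | cons p rest ih =>
    obtain ⟨c', alts'⟩ := p
    simp only [List.map_cons, List.nodup_cons] at hndf
    simp only [pvAliasInfoAux] at h
    by_cases hb : alts'.contains s = true
    · rw [if_pos hb] at h
      cases hi : PySem.List.index? alts' s with
      | none => rw [hi] at h; exact absurd h (by simp)
      | some r' =>
        rw [hi] at h
        simp only [Option.some.injEq, Prod.mk.injEq] at h
        obtain ⟨h1, h2⟩ := h
        subst h1; subst h2
        rcases List.mem_cons.1 hc with he | ht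
        · obtain ⟨-, he2⟩ := Prod.mk.injEq .. ▸ he
          subst he2; exact hi
        · exact absurd (List.mem_map_of_mem (f := Prod.fst) ht) hndf.1
    · rw [if_neg hb] at h
      rcases List.mem_cons.1 hc with he | ht
      · obtain ⟨he1, -⟩ := Prod.mk.injEq .. ▸ he
        subst he1
        exact absurd (aliasAux_mem rest s c r h) hndf.1
      · exact ih hndf.2 ht h

lemma aliasInfo_nodup_fst : (pvAliases.map Prod.fst).Nodup := by decide
lemma aliasInfo_nodup_flat : (pvAliases.flatMap Prod.snd).Nodup := by decide

-- per key c, one step of B's header pass is a merge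
lemma bestStep_get (c : String) (alts : List String) (hc : (c, alts) ∈ pvAliases)
    (best : PySem.Dict String (Nat × String)) (h : String) :
    (pvBestStep best h).get? c
      = pvMerge (best.get? c) ((PySem.List.index? alts (pvStripLower h)).map (fun r => (r, h))) := by
  simp only [pvBestStep]
  cases hai : pvAliasInfo (pvStripLower h) with
  | none =>
    have hidx : PySem.List.index? alts (pvStripLower h) = none := by
      cases hi : PySem.List.index? alts (pvStripLower h) with
      | none => rfl
      | some r =>
        exact absurd hai (by
          rw [show pvAliasInfo (pvStripLower h) = pvAliasInfoAux pvAliases (pvStripLower h) from rfl,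
              aliasAux_of_index pvAliases _ c alts r aliasInfo_nodup_flat hc hi]
          simp)
    rw [hidx]
    cases best.get? c <;> rfl
  | some pr =>
    obtain ⟨c', rk⟩ := pr
    dsimp only
    by_cases hcc : c' = c
    · subst hcc
      have hidx : PySem.List.index? alts (pvStripLower h) = some rk :=
        aliasAux_to_index pvAliases _ c' alts rk aliasInfo_nodup_fst hc hai
      rw [hidx]
      cases hg : best.get? c' with
      | none => simp [PySem.Dict.get?_insert_self, pvMerge]
      | some cur =>
        dsimp only
        by_cases hlt : rk < cur.1
        · rw [if_pos hlt]
          simp [PySem.Dict.get?_insert_self, pvMerge, hlt]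
        · rw [if_neg hlt]
          simp [hg, pvMerge, hlt]
    · have hidx : PySem.List.index? alts (pvStripLower h) = none := by
        cases hi : PySem.List.index? alts (pvStripLower h) with
        | none => rfl
        | some r =>
          have := aliasAux_of_index pvAliases _ c alts r aliasInfo_nodup_flat hc hi
          rw [show pvAliasInfo (pvStripLower h) = pvAliasInfoAux pvAliases (pvStripLower h) from rfl, this] at hai
          simp only [Option.some.injEq, Prod.mk.injEq] at hai
          exact absurd hai.1.symm hcc
      rw [hidx]
      cases best.get? c' with
      | none =>
        dsimp only
        rw [PySem.Dict.get?_insert_of_ne _ _ (Ne.symm hcc)]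
        cases best.get? c <;> rfl
      | some cur =>
        dsimp only
        by_cases hlt : rk < cur.1
        · rw [if_pos hlt, PySem.Dict.get?_insert_of_ne _ _ (Ne.symm hcc)]
          cases best.get? c <;> rfl
        · rw [if_neg hlt]; cases best.get? c <;> rfl

lemma merge_assoc (a b c : Option (Nat × String)) :
    pvMerge (pvMerge a b) c = pvMerge a (pvMerge b c) := by
  cases a <;> cases b <;> cases c <;> simp only [pvMerge] <;> (try split_ifs) <;>
    (try dsimp only) <;> (try split_ifs) <;> first | rfl | (exfalso; omega)

lemma merge_none_right (a : Option (Nat × String)) : pvMerge a none = a := by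
  cases a <;> rfl

lemma fold_bestStep_get (c : String) (alts : List String) (hc : (c, alts) ∈ pvAliases)
    (hs : List String) (best : PySem.Dict String (Nat × String)) :
    ((hs.foldl pvBestStep best).get? c) = pvMerge (best.get? c) (pvBest alts hs) := by
  induction hs generalizing best with
  | nil => simp [pvBest, merge_none_right]
  | cons h t ih =>
    simp only [List.foldl_cons, pvBest]
    rw [ih (pvBestStep best h), bestStep_get c alts hc, merge_assoc]

lemma best_get (c : String) (alts : List String) (hc : (c, alts) ∈ pvAliases) (hs : List String) :
    ((hs.foldl pvBestStep PySem.Dict.empty).get? c) = pvBest alts hs := by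
  rw [fold_bestStep_get c alts hc, PySem.Dict.get?_empty]
  rfl

-- ---------- pvBest characterized by pvFirstF ----------

lemma bind_index_eq_find (hs : List String) (a : String) :
    (PySem.List.index? (hs.map pvStripLower) a).bind (fun i => hs[i]?)
      = hs.find? (fun h => pvStripLower h == a) := by
  induction hs with
  | nil => simp [PySem.List.index?_eq_idxOf?]
  | cons h t ih =>
    by_cases hsl : pvStripLower h = a
    · rw [List.map_cons, hsl, PySem.List.index?_cons_self]
      simp [List.find?_cons_of_pos, hsl]
    · rw [List.map_cons, PySem.List.index?_cons_of_ne _ (by simpa using hsl)]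
      rw [List.find?_cons_of_neg (by simpa using hsl), ← ih]
      cases PySem.List.index? (t.map pvStripLower) a with
      | none => rfl
      | some r => simp

lemma firstAlt_bind_eq_firstF (alts hs : List String) :
    (pvFirstAltIdx (hs.map pvStripLower) alts).bind (fun i => hs[i]?) = pvFirstF alts hs := by
  induction alts with
  | nil => rfl
  | cons a rest ih =>
    simp only [pvFirstAltIdx, pvFirstF]
    by_cases hct : (hs.map pvStripLower).contains a = true
    · rw [if_pos hct, if_pos hct, bind_index_eq_find]
    · rw [if_neg hct, if_neg hct, ih]

lemma best_nil_alts (hs : List String) : pvBest [] hs = none := by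
  induction hs with
  | nil => rfl
  | cons h t ih =>
    simp only [pvBest, ih]
    rw [(PySem.List.index?_eq_none_iff _ _).2 (by simp)]
    rfl

lemma merge_zero_left (x : String) (o : Option (Nat × String)) :
    pvMerge (some (0, x)) o = some (0, x) := by
  cases o with
  | none => rfl
  | some q => simp [pvMerge]

lemma best_cons_of_mem (a : String) (rest hs : List String) (ha : a ∈ hs.map pvStripLower) :
    pvBest (a :: rest) hs = (hs.find? (fun h => pvStripLower h == a)).map (fun h => (0, h)) := by
  induction hs with
  | nil => simp at ha
  | cons h t ih =>
    by_cases hsl : pvStripLower h = a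
    · have hidx : PySem.List.index? (a :: rest) (pvStripLower h) = some 0 := by
        rw [hsl]; exact PySem.List.index?_cons_self _ _
      simp only [pvBest, hidx, Option.map_some]
      rw [List.find?_cons_of_pos (by simp [hsl]), merge_zero_left]
      rfl
    · have ha' : a ∈ t.map pvStripLower := by
        rcases (by simpa using ha : a = pvStripLower h ∨ ∃ x ∈ t, pvStripLower x = a) with he | ⟨x, hx, hxa⟩
        · exact absurd he.symm hsl
        · exact List.mem_map.2 ⟨x, hx, hxa⟩
      have hex : ∃ h0, List.find? (fun h => pvStripLower h == a) t = some h0 := by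
        rw [← Option.isSome_iff_exists, List.find?_isSome]
        obtain ⟨x, hx, hxa⟩ := List.mem_map.1 ha'
        exact ⟨x, hx, by simp [hxa]⟩
      obtain ⟨h0, hf0⟩ := hex
      simp only [pvBest]
      rw [ih ha', hf0,
          List.find?_cons_of_neg (p := fun h => pvStripLower h == a) (by simpa using hsl), hf0,
          PySem.List.index?_cons_of_ne rest (Ne.symm hsl)]
      cases PySem.List.index? rest (pvStripLower h) with
      | none => rfl
      | some r => simp [pvMerge]
lemma merge_map_succ (p q : Option (Nat × String)) :
    pvMerge (p.map (fun x => (x.1 + 1, x.2))) (q.map (fun x => (x.1 + 1, x.2)))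
      = (pvMerge p q).map (fun x => (x.1 + 1, x.2)) := by
  cases p <;> cases q <;> simp only [Option.map_none, Option.map_some, pvMerge] <;>
    (try split_ifs) <;> (try dsimp only) <;> (try split_ifs) <;> first | rfl | (exfalso; omega)
lemma best_cons_of_not_mem (a : String) (rest hs : List String)
    (ha : ∀ h ∈ hs, pvStripLower h ≠ a) :
    pvBest (a :: rest) hs = (pvBest rest hs).map (fun x => (x.1 + 1, x.2)) := by
  induction hs with
  | nil => rfl
  | cons h t ih =>
    have hne : pvStripLower h ≠ a := ha h List.mem_cons_self
    simp only [pvBest]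
    rw [ih (fun x hx => ha x (List.mem_cons_of_mem _ hx)),
        PySem.List.index?_cons_of_ne rest (Ne.symm hne), ← merge_map_succ]
    congr 1
    cases PySem.List.index? rest (pvStripLower h) <;> simp

lemma best_snd (alts hs : List String) :
    (pvBest alts hs).map Prod.snd = pvFirstF alts hs := by
  induction alts with
  | nil => simp [best_nil_alts, pvFirstF]
  | cons a rest ih =>
    simp only [pvFirstF]
    by_cases hm : (hs.map pvStripLower).contains a = true
    · rw [if_pos hm, best_cons_of_mem a rest hs (by simpa using hm)]
      cases hs.find? (fun h => pvStripLower h == a) <;> rfl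
    · rw [if_neg hm, best_cons_of_not_mem a rest hs
          (by intro h hh he; exact hm (by simp; exact ⟨h, hh, he⟩))]
      rw [← ih]
      cases pvBest rest hs <;> rfl

-- ---------- B's output pass emits the delta list ----------

lemma foldOut_items (headers : List String) (rem : List (String × List String))
    (out : PySem.Dict String String)
    (hsub : ∀ q ∈ rem, q ∈ pvAliases)
    (hfresh : ∀ q ∈ rem, out.contains q.1 = false)
    (hnd : (rem.map Prod.fst).Nodup) :
    (rem.foldl (fun out p =>
        match (headers.foldl pvBestStep PySem.Dict.empty).get? p.1 with
        | some pr => out.insert p.1 pr.2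
        | none => out) out).items
      = out.items ++ pvDelta headers (headers.map pvStripLower) rem := by
  induction rem generalizing out with
  | nil => simp [pvDelta]
  | cons p rest ih =>
    simp only [List.foldl_cons]
    have hndc : (p.1 :: rest.map Prod.fst).Nodup := by simpa using hnd
    obtain ⟨hnd1, hnd2⟩ := List.nodup_cons.1 hndc
    have hsubt : ∀ q ∈ rest, q ∈ pvAliases := fun q hq => hsub q (List.mem_cons_of_mem _ hq)
    have hget : (headers.foldl pvBestStep PySem.Dict.empty).get? p.1 = pvBest p.2 headers := by
      have := best_get p.1 p.2 (by simpa using hsub p List.mem_cons_self) headers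
      exact this
    rw [hget]
    cases hb : pvBest p.2 headers with
    | none =>
      have hbind : (pvFirstAltIdx (headers.map pvStripLower) p.2).bind (fun i => headers[i]?) = none := by
        have hx := best_snd p.2 headers
        rw [hb] at hx
        rw [firstAlt_bind_eq_firstF, ← hx]
        rfl
      rw [ih out hsubt (fun q hq => hfresh q (List.mem_cons_of_mem _ hq)) hnd2]
      simp [pvDelta, hbind]
    | some pr =>
      have hbind : (pvFirstAltIdx (headers.map pvStripLower) p.2).bind (fun i => headers[i]?) = some pr.2 := by
        have hx := best_snd p.2 headers
        rw [hb] at hx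
        rw [firstAlt_bind_eq_firstF, ← hx]
        rfl
      have hfp : out.contains p.1 = false := hfresh p List.mem_cons_self
      have hins : ∀ q ∈ rest, (out.insert p.1 pr.2).contains q.1 = false := by
        intro q hq
        rw [PySem.Dict.contains_insert]
        have hne : q.1 ≠ p.1 := fun he => hnd1 (he ▸ List.mem_map_of_mem hq)
        simp [hne, hfresh q (List.mem_cons_of_mem _ hq)]
      rw [ih (out.insert p.1 pr.2) hsubt hins hnd2,
          PySem.Dict.items_insert_of_not_contains _ _ hfp]
      simp [pvDelta, hbind]

lemma fallbackB_eq_delta (headers : List String) :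
    pvFallbackB headers = pvDelta headers (headers.map pvStripLower) pvAliases := by
  simp only [pvFallbackB]
  rw [foldOut_items headers pvAliases PySem.Dict.empty (fun q hq => hq)
        (fun q _ => PySem.Dict.contains_empty _) (by decide)]
  rfl

lemma fallback_eq (headers : List String) :
    resolve_canonical_to_source_py headers none = pvFallbackB headers := by
  rw [fallbackA_eq_delta, fallbackB_eq_delta]

-- ---------- the mapping_arg branch ----------

lemma lowmap_get (hs : List String) (d : PySem.Dict String String) (key : String) :
    ((hs.foldl (fun d h => d.setdefault (pvStripLower h) h) d).get? key)
      = (d.get? key).or (hs.find? (fun h => pvStripLower h == key)) := by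
  induction hs generalizing d with
  | nil => simp
  | cons h t ih =>
    simp only [List.foldl_cons]
    rw [ih]
    by_cases hk : key = pvStripLower h
    · subst hk
      rw [PySem.Dict.get?_setdefault_self, List.find?_cons_of_pos (by simp)]
      cases d.get? (pvStripLower h) <;> rfl
    · rw [PySem.Dict.get?_setdefault_of_ne _ _ hk,
          List.find?_cons_of_neg (by simpa using fun he => hk he.symm)]

lemma stepA_eq_stepB (headers : List String) :
    pvOutStepA headers (headers.map pvStripLower)
      = pvOutStepB (PySem.Set.ofList headers)
          (headers.foldl (fun d h => d.setdefault (pvStripLower h) h) PySem.Dict.empty) := by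
  funext out p
  simp only [pvOutStepA, pvOutStepB]
  by_cases h1 : p.2 = ""
  · simp [h1]
  · simp only [h1, ne_eq, not_false_iff, if_true, if_false]
    have hex : (PySem.Set.ofList headers).contains p.2 = headers.contains p.2 := by
      by_cases hm : p.2 ∈ headers
      · rw [(PySem.Set.contains_iff _ _).2 ((PySem.Set.mem_ofList _ _).2 hm), (List.contains_iff_mem).2 hm]
      · have h1' : ¬ (PySem.Set.contains (PySem.Set.ofList headers) p.2 = true) :=
          fun hc => hm ((PySem.Set.mem_ofList _ _).1 ((PySem.Set.contains_iff _ _).1 hc))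
        have h2' : ¬ (headers.contains p.2 = true) := fun hc => hm (List.contains_iff_mem.1 hc)
        rw [Bool.not_eq_true] at h1' h2'
        rw [h1', h2']
    rw [hex]
    by_cases h2 : headers.contains p.2 = true
    · rw [if_pos h2, if_pos h2]
    · rw [if_neg h2, if_neg h2]
      have hlm : ((headers.foldl (fun d h => d.setdefault (pvStripLower h) h) PySem.Dict.empty).get?
            (PySem.Str.lower p.2))
          = (PySem.List.index? (headers.map pvStripLower) (PySem.Str.lower p.2)).bind
              (fun i => headers[i]?) := by
        rw [lowmap_get, PySem.Dict.get?_empty, Option.none_or, bind_index_eq_find]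
      by_cases h3 : (headers.map pvStripLower).contains (PySem.Str.lower p.2) = true
      · rw [if_pos h3]
        cases hi : PySem.List.index? (headers.map pvStripLower) (PySem.Str.lower p.2) with
        | none =>
          exact absurd ((PySem.List.index?_eq_none_iff _ _).1 hi)
            (by simpa using List.contains_iff_mem.1 h3)
        | some i =>
          rw [hlm, hi]
          cases headers[i]? <;> rfl
      · rw [if_neg h3, hlm,
            (PySem.List.index?_eq_none_iff _ _).2 (by
              intro hm
              exact h3 (List.contains_iff_mem.2 hm))]
        rfl

-- ===== VERDICT (by name: the statement is the Claim_ definition above) =====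
theorem resolve_canonical_to_source_py_spec : Claim_equal_resolve_canonical_to_source_py := by
  intro headers mapping_arg _
  unfold Spec_resolve_canonical_to_source_py
  cases mapping_arg with
  | none => exact fallback_eq headers
  | some lst =>
    have hfb := fallback_eq headers
    simp only [resolve_canonical_to_source_py, resolve_canonical_to_source_py_alt] at hfb ⊢
    rw [stepA_eq_stepB headers]
    by_cases h1 : (PySem.Dict.ofList lst).items.isEmpty = true
    · rw [if_pos h1, if_pos h1, hfb]
    · rw [if_neg h1, if_neg h1]
      by_cases h2 : ((PySem.Dict.ofList lst).items.foldl
          (pvOutStepB (PySem.Set.ofList headers)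
            (headers.foldl (fun d h => d.setdefault (pvStripLower h) h) PySem.Dict.empty))
          PySem.Dict.empty).items.isEmpty = true
      · rw [if_pos h2, if_pos h2, hfb]
      · rw [if_neg h2, if_neg h2]
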